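-- pv_equiv track=rewrite | github.com/pypi-data/pypi-mirror-397 | packages/webis-html/webis_html-1.0.4.tar.gz/webis_html-1.0.4/webis_html/core/dataset_processor.py | path_to_html
-- ===== SOURCE A (Python) =====
-- def path_to_html(text,path):
--     tags = path.split(' > ')
--     html_structure = "<><html><body>"
--
--     for tag in tags[2:]:
--         tag_name = tag.split('[')[0]
--         html_structure += f"<{tag_name}>"
--
--     html_structure += text
--
--     for tag in reversed(tags[2:]):
--         tag_name = tag.split('[')[0]
--         html_structure += f"</{tag_name}>"
--
--     html_structure += "</body></html></>"
--     return html_structure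
-- ===== SOURCE B (Python) =====
-- def path_to_html(text, path):
--     names = [tag.split('[')[0] for tag in path.split(' > ')[2:]]
--     core = text
--     for name in reversed(names):
--         core = f"<{name}>" + core + f"</{name}>"
--     return "<><html><body>" + core + "</body></html></>"
-- ===== Notes on version B (the rewrite author's own statement) =====
-- stated objective: simpler
-- what changed: B extracts the tag names once and builds the result inside-out with a single wrapping loop (core = <n>+core+</n> over the reversed names) instead of A's two separate passes that append opening tags forward and closing tags over the reversed list.
import Mathlib
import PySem

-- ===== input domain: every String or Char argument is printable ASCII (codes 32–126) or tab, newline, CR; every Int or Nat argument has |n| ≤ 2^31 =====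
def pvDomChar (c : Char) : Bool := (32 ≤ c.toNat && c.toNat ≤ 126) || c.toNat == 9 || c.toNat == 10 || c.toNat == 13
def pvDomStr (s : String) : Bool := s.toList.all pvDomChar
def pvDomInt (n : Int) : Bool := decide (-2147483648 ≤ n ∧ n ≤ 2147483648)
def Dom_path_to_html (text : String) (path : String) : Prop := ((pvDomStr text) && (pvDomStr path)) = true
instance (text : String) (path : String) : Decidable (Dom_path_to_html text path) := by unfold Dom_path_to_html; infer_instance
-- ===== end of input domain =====

-- B builds the result inside-out with one wrapping loop over the reversed tag names,
-- instead of A's two passes (opening tags forward, closing tags over the reversed list); same cost.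

-- tag.split('[')[0] — sep ≠ "" so split? is always `some` (getD [] never fires) and the list nonempty, [0] never raises
def pvTagName (tag : String) : String := ((PySem.Str.split? tag "[").getD []).headD ""

-- ===== PORT A =====
def path_to_html (text : String) (path : String) : String :=
  let tags := ((PySem.Str.split? path " > ").getD [])
  let h1 := (PySem.List.slice tags (some 2) none).foldl
              (fun acc tag => acc ++ ("<" ++ pvTagName tag ++ ">")) "<><html><body>"
  let h2 := h1 ++ text
  let h3 := (PySem.List.slice tags (some 2) none).reverse.foldl
              (fun acc tag => acc ++ ("</" ++ pvTagName tag ++ ">")) h2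
  h3 ++ "</body></html></>"

-- ===== PORT B =====
def path_to_html_alt (text : String) (path : String) : String :=
  let names := (PySem.List.slice (((PySem.Str.split? path " > ").getD [])) (some 2) none).map pvTagName
  let core := names.reverse.foldl (fun core n => "<" ++ n ++ ">" ++ core ++ ("</" ++ n ++ ">")) text
  "<><html><body>" ++ core ++ "</body></html></>"

-- ===== PRECONDITION & SPEC =====
def Spec_path_to_html (text : String) (path : String) (out : String) : Prop := out = path_to_html_alt text path
instance (text : String) (path : String) (out : String) : Decidable (Spec_path_to_html text path out) := by unfold Spec_path_to_html; infer_instance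

-- ===== CLAIM (what is proved, stated in full; the proofs are below) =====
def Claim_equal_path_to_html : Prop := ∀ (text : String) (path : String), Dom_path_to_html text path → Spec_path_to_html text path (path_to_html text path)

-- ===== LEMMAS AND PROOFS =====

-- A's two passes around `text` equal B's single wrapping fold over the mapped names.
theorem pv_key (f : String → String) (ts : List String) (pre text : String) :
    ts.reverse.foldl (fun acc t => acc ++ ("</" ++ f t ++ ">"))
      ((ts.foldl (fun acc t => acc ++ ("<" ++ f t ++ ">")) pre) ++ text)
    = pre ++ (ts.map f).reverse.foldl (fun core n => "<" ++ n ++ ">" ++ core ++ ("</" ++ n ++ ">")) text := by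
  induction ts generalizing pre with
  | nil => simp
  | cons t rest ih =>
      simp only [List.reverse_cons, List.map_cons, List.foldl_append, List.foldl_cons,
        List.foldl_nil]
      rw [ih (pre ++ ("<" ++ f t ++ ">"))]
      simp [String.append_assoc]

-- ===== VERDICT (by name: the statement is the Claim_ definition above) =====
theorem path_to_html_spec : Claim_equal_path_to_html := by
  intro text path _
  unfold Spec_path_to_html path_to_html path_to_html_alt
  simp only []
  rw [pv_key]
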